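-- pv_equiv track=rewrite | github.com/Hattinger04/Kryptografie | columnar_transposition.py | encrypt_columnar_disrupted
-- ===== SOURCE A (Python) =====
-- import string
--
-- def encrypt_columnar_disrupted(plaintext, key1, key2):
--     arr = [[]]
--     counter = 0
--     updated_text = make_spaces(plaintext, key2)
--     key1values = get_order_of_keyword(key1)
--
--     for index, char in enumerate(updated_text):
--         if index % len(key1) == 0 and index != 0:
--             arr.append([])
--             counter += 1
--         arr[counter].append(char)
--
--     result = [[]] * len(key1)
--     for value in key1values:
--         for a in arr:
--             if len(a) > value:
--                 result[value] = result[value] + list(a[value])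
--     liste = [[]] * len(key1)
--     for index, key in enumerate(key1values):
--         liste[key] = result[index]
--     cipher = ""
--     for i in liste:
--         cipher = cipher + "".join(i)
--     return cipher
--
-- def get_order_of_keyword(keyword):
--     result = [0] * len(keyword)
--     counter = 0
--     for letter in string.ascii_uppercase:
--         for index, char in enumerate(keyword):
--             if char is letter:
--                 result[index] = counter
--                 counter += 1
--     return result
--
-- def make_spaces(plaintext, key):
--     keyorder = get_order_of_keyword(key)
--     updated_text = ""
--     rounds = len(plaintext) // len(key) + 1
--     try:
--         for round in range(rounds):
--             for k in keyorder:
--                 for chars in range(k):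
--                     updated_text += plaintext[0]
--                     plaintext = plaintext[1:]
--                 updated_text += " "
--     except IndexError:
--         return updated_text
--     return updated_text
-- ===== SOURCE B (Python) =====
-- import string
--
-- def get_order_of_keyword(keyword):
--     result = [0] * len(keyword)
--     counter = 0
--     for letter in string.ascii_uppercase:
--         for index, char in enumerate(keyword):
--             if char == letter:
--                 result[index] = counter
--                 counter += 1
--     return result
--
-- def make_spaces_linear(plaintext, key):
--     # same disrupted padding, built with an index pointer and batched slices
--     keyorder = get_order_of_keyword(key)
--     parts = []
--     p = 0
--     for _ in range(len(plaintext) // len(key) + 1):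
--         for k in keyorder:
--             take = min(k, len(plaintext) - p)
--             parts.append(plaintext[p:p + take])
--             p += take
--             if take < k:
--                 return "".join(parts)
--             parts.append(" ")
--     return "".join(parts)
--
-- def encrypt_columnar_disrupted(plaintext, key1, key2):
--     text = make_spaces_linear(plaintext, key2)
--     order = get_order_of_keyword(key1)
--     n = len(key1)
--     cols = [""] * n
--     for i, ch in enumerate(text):
--         cols[i % n] += ch
--     ranked = [""] * n
--     for v in order:
--         ranked[v] += cols[v]
--     out = [""] * n
--     for i, v in enumerate(order):
--         out[v] = ranked[i]
--     return "".join(out)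
-- ===== Notes on version B (the rewrite author's own statement) =====
-- stated objective: faster
-- what changed: The padded text is built with an index pointer and batched slices instead of re-slicing the whole plaintext one character at a time, and the columns are formed directly in one pass (cols[i % n] += ch) instead of first chunking the text into rows and then, per key value, rescanning every row and rebuilding a list by concatenation; Pre_ excludes empty key1/key2, on which A raises ZeroDivisionError except for one degenerate corner where both return ''.
-- outside the precondition, e.g. on encrypt_columnar_disrupted('', '', 'BA'): A returns '', B returns ''
import Mathlib
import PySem

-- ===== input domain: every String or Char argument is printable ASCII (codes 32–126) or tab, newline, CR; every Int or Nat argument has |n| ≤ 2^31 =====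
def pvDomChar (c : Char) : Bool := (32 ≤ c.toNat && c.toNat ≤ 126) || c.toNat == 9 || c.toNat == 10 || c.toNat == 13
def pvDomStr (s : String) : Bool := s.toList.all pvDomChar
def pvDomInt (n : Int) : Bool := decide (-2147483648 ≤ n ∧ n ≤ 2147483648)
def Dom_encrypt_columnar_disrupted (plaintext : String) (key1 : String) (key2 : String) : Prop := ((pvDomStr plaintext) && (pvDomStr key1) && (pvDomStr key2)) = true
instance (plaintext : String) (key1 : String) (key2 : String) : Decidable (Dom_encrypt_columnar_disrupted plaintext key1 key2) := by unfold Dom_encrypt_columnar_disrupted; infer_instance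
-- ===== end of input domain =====

set_option maxHeartbeats 1000000

-- B builds the padded text with an index pointer and forms the columns in one pass,
-- replacing A's quadratic slice-and-rescan; return values agree on Pre_ (nonempty keys).

-- ===== PORT A =====

-- get_order_of_keyword: for each uppercase letter, scan the keyword; matching positions get the
-- running counter.  ('char is letter' on 1-char ASCII strings is CPython-interned equality.)
def pyGetOrder (kw : List Char) : List Int :=
  (("ABCDEFGHIJKLMNOPQRSTUVWXYZ".toList).foldl
    (fun (st : List Int × Int) letter =>
      (PySem.List.enumerate kw).foldl
        (fun (st : List Int × Int) ic =>
          if ic.2 = letter then (st.1.set ic.1.toNat st.2, st.2 + 1) else st) st)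
    (List.replicate kw.length (0 : Int), (0 : Int))).1

-- inner 'for chars in range(k)': updated_text += plaintext[0]; plaintext = plaintext[1:].
-- plaintext[0] on [] is the IndexError; the except-branch returns updated_text (the .inr case).
def msTake : Nat → List Char → List Char → (List Char × List Char) ⊕ (List Char)
  | 0, ut, pt => .inl (ut, pt)
  | nk + 1, ut, pt =>
    match pt with
    | [] => .inr ut
    | c :: rest => msTake nk (ut ++ [c]) rest

-- middle 'for k in keyorder' loop of make_spaces
def msKeys : List Int → List Char → List Char → (List Char × List Char) ⊕ (List Char)
  | [], ut, pt => .inl (ut, pt)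
  | k :: ks, ut, pt =>
    match msTake k.toNat ut pt with
    | .inr r => .inr r
    | .inl (ut', pt') => msKeys ks (ut' ++ [' ']) pt'

-- outer 'for round in range(rounds)' loop of make_spaces
def msRounds : Nat → List Int → List Char → List Char → List Char
  | 0, _, ut, _ => ut
  | r + 1, ko, ut, pt =>
    match msKeys ko ut pt with
    | .inr res => res
    | .inl (ut', pt') => msRounds r ko ut' pt'

def makeSpacesA (pt ky : List Char) : List Char :=
  let keyorder := pyGetOrder ky
  let rounds := PySem.Int.floordiv (pt.length : Int) (ky.length : Int) + 1
  msRounds rounds.toNat keyorder [] pt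

-- body of the 'for index, char in enumerate(updated_text)' loop building arr/counter
def chunkStep (n : Nat) (st : List (List Char) × Nat) (ic : Int × Char) : List (List Char) × Nat :=
  let st' := if PySem.Int.mod ic.1 (n : Int) = 0 ∧ ic.1 ≠ 0 then (st.1 ++ [([] : List Char)], st.2 + 1) else st
  (st'.1.set st'.2 (st'.1.getD st'.2 [] ++ [ic.2]), st'.2)

-- body of 'for a in arr: if len(a) > value: result[value] = result[value] + list(a[value])'
def resInner (value : Int) (res : List (List Char)) (a : List Char) : List (List Char) :=
  if value < (a.length : Int) then
    match PySem.List.pyGet? a value with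
    | some c => res.set value.toNat (res.getD value.toNat [] ++ [c])
    | none => res
  else res

def resStep (arr : List (List Char)) (res : List (List Char)) (value : Int) : List (List Char) :=
  arr.foldl (resInner value) res

-- body of 'for index, key in enumerate(key1values): liste[key] = result[index]'
def listeStep (result : List (List Char)) (li : List (List Char)) (ik : Int × Int) : List (List Char) :=
  li.set ik.2.toNat (result.getD ik.1.toNat [])

def encrypt_columnar_disrupted (plaintext : String) (key1 : String) (key2 : String) : String :=
  let updated := makeSpacesA plaintext.toList key2.toList
  let kv := pyGetOrder key1.toList
  let n := key1.toList.length
  let arr := ((PySem.List.enumerate updated).foldl (chunkStep n) ([[]], 0)).1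
  let result := kv.foldl (resStep arr) (List.replicate n ([] : List Char))
  let liste := (PySem.List.enumerate kv).foldl (listeStep result) (List.replicate n ([] : List Char))
  String.ofList (liste.foldl (fun c i => c ++ i) [])

-- ===== PORT B =====

-- Source B's make_spaces_linear: one index pointer, batched take of min(k, n-p) chars via one slice.
def msFastKeys : List Int → List Char → Int → List (List Char) → (List (List Char) × Int) ⊕ (List (List Char))
  | [], _, p, parts => .inl (parts, p)
  | k :: ks, pt, p, parts =>
    let take := min k ((pt.length : Int) - p)
    let parts' := parts ++ [PySem.List.slice pt (some p) (some (p + take))]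
    if take < k then .inr parts'
    else msFastKeys ks pt (p + take) (parts' ++ [[' ']])

def msFastRounds : Nat → List Int → List Char → Int → List (List Char) → List (List Char)
  | 0, _, _, _, parts => parts
  | r + 1, ko, pt, p, parts =>
    match msFastKeys ko pt p parts with
    | .inr res => res
    | .inl (parts', p') => msFastRounds r ko pt p' parts'

-- ''.join(parts), applied at whichever exit returns
def makeSpacesFast (pt ky : List Char) : List Char :=
  let keyorder := pyGetOrder ky
  let rounds := PySem.Int.floordiv (pt.length : Int) (ky.length : Int) + 1
  (msFastRounds rounds.toNat keyorder pt 0 []).flatten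

-- one pass: cols[i % n] += ch
def colsStep (n : Nat) (cols : List (List Char)) (ic : Int × Char) : List (List Char) :=
  cols.set (ic.1.toNat % n) (cols.getD (ic.1.toNat % n) [] ++ [ic.2])

-- for v in order: ranked[v] += cols[v]
def gatherStep (cols : List (List Char)) (g : List (List Char)) (v : Int) : List (List Char) :=
  g.set v.toNat (g.getD v.toNat [] ++ cols.getD v.toNat [])

-- for i, v in enumerate(order): out[v] = ranked[i]
def placeStep (ranked : List (List Char)) (out : List (List Char)) (iv : Int × Int) : List (List Char) :=
  out.set iv.2.toNat (ranked.getD iv.1.toNat [])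

def encrypt_columnar_disrupted_alt (plaintext : String) (key1 : String) (key2 : String) : String :=
  let text := makeSpacesFast plaintext.toList key2.toList
  let order := pyGetOrder key1.toList
  let n := key1.toList.length
  let cols := (PySem.List.enumerate text).foldl (colsStep n) (List.replicate n ([] : List Char))
  let ranked := order.foldl (gatherStep cols) (List.replicate n ([] : List Char))
  let out := (PySem.List.enumerate order).foldl (placeStep ranked) (List.replicate n ([] : List Char))
  String.ofList out.flatten

-- ===== PRECONDITION & SPEC =====
-- Pre_ excludes empty key1 / empty key2: there Python A raises ZeroDivisionError (len(key)==0 in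
-- make_spaces' rounds, or index % len(key1)), except on a degenerate corner (empty processed text)
-- where A returns "" and B returns "" as well.
def Pre_encrypt_columnar_disrupted (plaintext : String) (key1 : String) (key2 : String) : Prop :=
  key1 ≠ "" ∧ key2 ≠ ""
instance (plaintext : String) (key1 : String) (key2 : String) : Decidable (Pre_encrypt_columnar_disrupted plaintext key1 key2) := by
  unfold Pre_encrypt_columnar_disrupted; infer_instance

def pvWitness_encrypt_columnar_disrupted : String × String × String := ("HELLO WORLD", "KEY", "AB")

def Spec_encrypt_columnar_disrupted (plaintext : String) (key1 : String) (key2 : String) (out : String) : Prop := out = encrypt_columnar_disrupted_alt plaintext key1 key2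
instance (plaintext : String) (key1 : String) (key2 : String) (out : String) : Decidable (Spec_encrypt_columnar_disrupted plaintext key1 key2 out) := by unfold Spec_encrypt_columnar_disrupted; infer_instance

-- ===== CLAIM (what is proved, stated in full; the proofs are below) =====
def Claim_equal_encrypt_columnar_disrupted : Prop := ∀ (plaintext : String) (key1 : String) (key2 : String), Dom_encrypt_columnar_disrupted plaintext key1 key2 → Pre_encrypt_columnar_disrupted plaintext key1 key2 → Spec_encrypt_columnar_disrupted plaintext key1 key2 (encrypt_columnar_disrupted plaintext key1 key2)

-- ===== LEMMAS AND PROOFS =====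

theorem encrypt_columnar_disrupted_witness_ok :
    Dom_encrypt_columnar_disrupted (pvWitness_encrypt_columnar_disrupted.1) (pvWitness_encrypt_columnar_disrupted.2.1) (pvWitness_encrypt_columnar_disrupted.2.2) ∧
    Pre_encrypt_columnar_disrupted (pvWitness_encrypt_columnar_disrupted.1) (pvWitness_encrypt_columnar_disrupted.2.1) (pvWitness_encrypt_columnar_disrupted.2.2) := by
  decide

-- ---------- generic helpers ----------

theorem pvFoldlInv {α σ : Type} {P : σ → Prop} (f : σ → α → σ) (l : List α) :
    ∀ (init : σ), P init → (∀ s x, x ∈ l → P s → P (f s x)) → P (l.foldl f init) := by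
  induction l with
  | nil => intro init h0 _; simpa using h0
  | cons x t ih =>
    intro init h0 hs
    simp only [List.foldl_cons]
    exact ih (f init x) (hs init x (by simp) h0) (fun s y hy h => hs s y (by simp [hy]) h)

theorem pvGetDSet_self (l : List (List Char)) (i : Nat) (x : List Char) (h : i < l.length) :
    (l.set i x).getD i [] = x := by
  rw [List.getD_eq_getElem?_getD, List.getElem?_set_self (by simpa using h)]; rfl

theorem pvGetDSet_ne (l : List (List Char)) (i j : Nat) (x : List Char) (h : i ≠ j) :
    (l.set i x).getD j [] = l.getD j [] := by
  rw [List.getD_eq_getElem?_getD, List.getElem?_set_ne h, ← List.getD_eq_getElem?_getD]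

theorem pvSetGetDSelf (l : List (List Char)) (i : Nat) : l.set i (l.getD i []) = l := by
  by_cases h : i < l.length
  · rw [List.getD_eq_getElem l [] h, List.set_getElem_self]
  · exact List.set_eq_of_length_le (by omega)

theorem pvGetDAppendLast (xs : List (List Char)) (y : List Char) :
    (xs ++ [y]).getD xs.length [] = y := by
  rw [List.getD_eq_getElem?_getD, List.getElem?_append_right (le_refl _)]
  simp

theorem pvSetAppendLast (xs : List (List Char)) (y z : List Char) :
    (xs ++ [y]).set xs.length z = xs ++ [z] := by
  rw [List.set_append, if_neg (by omega)]
  simp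

theorem pvDropTakeOne (l : List Char) (c : Char) (v : Nat) :
    ((l ++ [c]).drop v).take 1 = (l.drop v).take 1 ++ (if l.length = v then [c] else []) := by
  rcases lt_trichotomy v l.length with h | h | h
  · rw [List.drop_append_of_le_length (le_of_lt h),
        List.take_append_of_le_length (by simp [List.length_drop]; omega),
        if_neg (by omega), List.append_nil]
  · subst h
    rw [List.drop_append_of_le_length (le_refl _)]
    simp
  · rw [List.drop_eq_nil_of_le (by simp; omega), List.drop_eq_nil_of_le (by omega)]
    rw [if_neg (by omega)]
    simp

-- ---------- pyGetOrder ----------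

theorem pyGetOrder_nonneg (kw : List Char) : ∀ v ∈ pyGetOrder kw, 0 ≤ v := by
  have h : (fun st : List Int × Int => (∀ v ∈ st.1, 0 ≤ v) ∧ 0 ≤ st.2)
      (("ABCDEFGHIJKLMNOPQRSTUVWXYZ".toList).foldl
        (fun (st : List Int × Int) letter =>
          (PySem.List.enumerate kw).foldl
            (fun (st : List Int × Int) ic =>
              if ic.2 = letter then (st.1.set ic.1.toNat st.2, st.2 + 1) else st) st)
        (List.replicate kw.length (0 : Int), (0 : Int))) := by
    refine pvFoldlInv (P := fun st : List Int × Int => (∀ v ∈ st.1, 0 ≤ v) ∧ 0 ≤ st.2) _ _ _ ⟨by simp, le_refl _⟩ ?_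
    intro s letter _ hs
    refine pvFoldlInv (P := fun st : List Int × Int => (∀ v ∈ st.1, 0 ≤ v) ∧ 0 ≤ st.2) _ _ _ hs ?_
    intro s' ic _ hs'
    dsimp only
    split
    · refine ⟨?_, by omega⟩
      intro v hv
      rcases List.mem_or_eq_of_mem_set hv with h | h
      · exact hs'.1 v h
      · omega
    · exact hs'
  exact fun v hv => h.1 v hv

-- ---------- make_spaces equivalence ----------

theorem msTake_eq : ∀ (k : Nat) (ut pt : List Char),
    msTake k ut pt = if k ≤ pt.length then .inl (ut ++ pt.take k, pt.drop k) else .inr (ut ++ pt) := by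
  intro k
  induction k with
  | zero => intro ut pt; simp [msTake]
  | succ nk ih =>
    intro ut pt
    cases pt with
    | nil => simp [msTake]
    | cons c rest =>
      rw [show msTake (nk + 1) ut (c :: rest) = msTake nk (ut ++ [c]) rest from rfl, ih]
      by_cases h : nk ≤ rest.length
      · rw [if_pos h, if_pos (by simp; omega)]
        simp
      · rw [if_neg h, if_neg (by simp; omega)]
        simp

theorem msFastKeys_inl_bounds : ∀ (ks : List Int) (pt0 : List Char) (p : Int)
    (parts parts' : List (List Char)) (p' : Int),
    (∀ k ∈ ks, 0 ≤ k) → 0 ≤ p → p ≤ pt0.length →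
    msFastKeys ks pt0 p parts = .inl (parts', p') → 0 ≤ p' ∧ p' ≤ pt0.length := by
  intro ks
  induction ks with
  | nil =>
    intro pt0 p parts parts' p' _ hp0 hp1 h
    simp only [msFastKeys, Sum.inl.injEq, Prod.mk.injEq] at h
    omega
  | cons k ks ih =>
    intro pt0 p parts parts' p' hk hp0 hp1 h
    simp only [msFastKeys] at h
    by_cases hc : min k ((pt0.length : Int) - p) < k
    · rw [if_pos hc] at h; exact absurd h (by simp)
    · rw [if_neg hc] at h
      have hk0 : 0 ≤ k := hk k (by simp)
      exact ih pt0 _ _ parts' p' (fun x hx => hk x (by simp [hx]))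
        (by omega) (by have := min_le_right k ((pt0.length : Int) - p); omega) h

theorem msFastKeys_eq : ∀ (ks : List Int) (pt0 : List Char) (p : Int) (parts : List (List Char)),
    (∀ k ∈ ks, 0 ≤ k) → 0 ≤ p → p ≤ pt0.length →
    msKeys ks parts.flatten (pt0.drop p.toNat) =
      (match msFastKeys ks pt0 p parts with
       | .inl (parts', p') => .inl (parts'.flatten, pt0.drop p'.toNat)
       | .inr parts' => .inr parts'.flatten) := by
  intro ks
  induction ks with
  | nil => intro pt0 p parts _ _ _; simp [msKeys, msFastKeys]
  | cons k ks ih =>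
    intro pt0 p parts hk hp0 hp1
    have hk0 : 0 ≤ k := hk k (by simp)
    simp only [msKeys, msFastKeys]
    set t := min k ((pt0.length : Int) - p) with ht
    have ht0 : 0 ≤ t := by omega
    have hslice : PySem.List.slice pt0 (some p) (some (p + t)) = (pt0.drop p.toNat).take t.toNat := by
      rw [PySem.List.slice_toNat pt0 hp0 (by omega)]
      congr 1
      omega
    rw [msTake_eq]
    by_cases hc : t < k
    · have htl : t = (pt0.length : Int) - p := by omega
      rw [if_neg (by simp [List.length_drop]; omega), if_pos hc]
      have h1 : PySem.List.slice pt0 (some p) (some (p + t)) = pt0.drop p.toNat := by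
        rw [hslice]
        apply List.take_of_length_le
        simp [List.length_drop]
        omega
      rw [h1]
      simp
    · have htk : t = k := by omega
      have hdrop : (pt0.drop p.toNat).drop k.toNat = pt0.drop (p + t).toNat := by
        rw [List.drop_drop]
        congr 1
        omega
      have h1 : (parts ++ [PySem.List.slice pt0 (some p) (some (p + t))] ++ [[' ']]).flatten
          = (parts.flatten ++ (pt0.drop p.toNat).take k.toNat) ++ [' '] := by
        rw [hslice]
        simp [htk]
      rw [if_pos (by simp [List.length_drop]; omega), if_neg hc]
      show msKeys ks ((parts.flatten ++ (pt0.drop p.toNat).take k.toNat) ++ [' '])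
          ((pt0.drop p.toNat).drop k.toNat) = _
      rw [hdrop, ← h1]
      exact ih pt0 (p + t) _ (fun x hx => hk x (by simp [hx])) (by omega) (by omega)

theorem msRounds_eq : ∀ (r : Nat) (ko : List Int) (pt0 : List Char) (p : Int) (parts : List (List Char)),
    (∀ k ∈ ko, 0 ≤ k) → 0 ≤ p → p ≤ pt0.length →
    msRounds r ko parts.flatten (pt0.drop p.toNat) = (msFastRounds r ko pt0 p parts).flatten := by
  intro r
  induction r with
  | zero => intro ko pt0 p parts _ _ _; simp [msRounds, msFastRounds]
  | succ r ih =>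
    intro ko pt0 p parts hk hp0 hp1
    simp only [msRounds, msFastRounds]
    rw [msFastKeys_eq ko pt0 p parts hk hp0 hp1]
    cases hfk : msFastKeys ko pt0 p parts with
    | inr parts' => rfl
    | inl pr =>
      obtain ⟨parts', p'⟩ := pr
      obtain ⟨hp0', hp1'⟩ := msFastKeys_inl_bounds ko pt0 p parts parts' p' hk hp0 hp1 hfk
      exact ih ko pt0 p' parts' hk hp0' hp1'

theorem makeSpaces_eq (pt ky : List Char) : makeSpacesA pt ky = makeSpacesFast pt ky := by
  unfold makeSpacesA makeSpacesFast
  have h := msRounds_eq (PySem.Int.floordiv (pt.length : Int) (ky.length : Int) + 1).toNat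
    (pyGetOrder ky) pt 0 [] (pyGetOrder_nonneg ky) (le_refl 0) (Int.natCast_nonneg _)
  simpa using h

-- ---------- columns (A's chunked arr  vs  B's one-pass cols) ----------

-- the v-th column of text under row width n
def colv (n v : Nat) (text : List Char) : List Char :=
  ((PySem.List.enumerate text).filter (fun ic => decide (ic.1.toNat % n = v))).map (·.2)

-- the v-th column as A reads it from arr
def colAt (arr : List (List Char)) (v : Nat) : List Char := arr.flatMap (fun a => (a.drop v).take 1)

theorem colv_nil (n v : Nat) : colv n v [] = [] := by simp [colv, PySem.List.enumerate_nil]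

theorem colv_append (n v : Nat) (text : List Char) (c : Char) :
    colv n v (text ++ [c]) = colv n v text ++ (if text.length % n = v then [c] else []) := by
  rw [colv, PySem.List.enumerate_append, PySem.List.enumerate_cons, PySem.List.enumerate_nil,
      List.filter_append, List.map_append]
  by_cases hc : text.length % n = v
  · simp [colv, hc]
  · simp [colv, hc]

theorem colAt_append (xs : List (List Char)) (y : List Char) (v : Nat) :
    colAt (xs ++ [y]) v = colAt xs v ++ (y.drop v).take 1 := by
  simp [colAt]

theorem chunkFold_inv (n : Nat) (hn : 0 < n) (text : List Char) :
    ∃ arr counter, (PySem.List.enumerate text).foldl (chunkStep n) ([[]], 0) = (arr, counter) ∧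
      arr.length = counter + 1 ∧
      text.length = counter * n + (arr.getD counter []).length ∧
      (arr.getD counter []).length ≤ n ∧
      (text ≠ [] → 0 < (arr.getD counter []).length) ∧
      (∀ a ∈ arr, a.length ≤ n) ∧
      ∀ v, v < n → colAt arr v = colv n v text := by
  induction text using List.reverseRecOn with
  | nil =>
    refine ⟨[[]], 0, by simp [PySem.List.enumerate_nil], by simp, by simp, by simp, by simp, ?_, ?_⟩
    · intro a ha
      simp at ha
      simp [ha]
    · intro v _
      simp [colAt, colv_nil]
  | append_singleton xs c ih =>
    obtain ⟨arr, counter, heq, hlen, hsum, hle, hpos, hall, hcol⟩ := ih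
    rw [PySem.List.enumerate_append, List.foldl_append, heq]
    simp only [PySem.List.enumerate_cons, PySem.List.enumerate_nil, List.foldl_cons, List.foldl_nil]
    have hcond : (PySem.Int.mod ((0 : Int) + (xs.length : Int)) (n : Int) = 0 ∧ ((0 : Int) + (xs.length : Int)) ≠ 0)
        ↔ (xs.length % n = 0 ∧ xs.length ≠ 0) := by
      rw [zero_add, PySem.Int.mod_natCast]
      constructor
      · intro ⟨h1, h2⟩; exact ⟨by exact_mod_cast h1, by exact_mod_cast fun h => h2 (by exact_mod_cast h)⟩
      · intro ⟨h1, h2⟩; exact ⟨by exact_mod_cast h1, by exact_mod_cast fun h => h2 (by exact_mod_cast h)⟩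
    unfold chunkStep
    by_cases hc : xs.length % n = 0 ∧ xs.length ≠ 0
    · -- a new row is opened and receives c
      have hln : (arr.getD counter []).length = n := by
        have h1 : 0 < (arr.getD counter []).length := hpos (by intro h; exact hc.2 (by simp [h]))
        have h2 : (arr.getD counter []).length % n = 0 := by
          have := hc.1
          rw [hsum, mul_comm counter n, Nat.mul_add_mod] at this
          exact this
        exact le_antisymm hle (Nat.le_of_dvd h1 (Nat.dvd_of_mod_eq_zero h2))
      rw [if_pos (hcond.mpr hc)]
      simp only
      have hgd : (arr ++ [([] : List Char)]).getD (counter + 1) [] = [] := by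
        rw [show counter + 1 = arr.length from by omega, pvGetDAppendLast]
      have hset : (arr ++ [([] : List Char)]).set (counter + 1) ([] ++ [c]) = arr ++ [[c]] := by
        rw [show counter + 1 = arr.length from by omega, pvSetAppendLast]
        simp
      rw [hgd]
      simp only [List.nil_append] at hset ⊢
      rw [hset]
      have hgd2 : (arr ++ [[c]]).getD (counter + 1) [] = [c] := by
        rw [show counter + 1 = arr.length from by omega, pvGetDAppendLast]
      refine ⟨arr ++ [[c]], counter + 1, rfl, by simp [hlen], ?_, ?_, ?_, ?_, ?_⟩
      · rw [hgd2]
        simp only [List.length_append, List.length_cons, List.length_nil]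
        rw [hsum, hln]
        ring
      · rw [hgd2]; simpa using hn
      · intro _; rw [hgd2]; simp
      · intro a ha
        rcases List.mem_append.mp ha with h | h
        · exact hall a h
        · simp at h
          simp [h]
          omega
      · intro v hv
        rw [colAt_append, hcol v hv, colv_append]
        by_cases hv0 : v = 0
        · subst hv0
          rw [if_pos hc.1]
          simp
        · rw [if_neg (by omega)]
          have : ([c] : List Char).drop v = [] := List.drop_eq_nil_of_le (by simp; omega)
          simp [this]
    · -- c is appended to the last row
      rw [if_neg (fun h => hc (hcond.mp h))]
      simp only
      set l := arr.getD counter [] with hl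
      have hne : arr ≠ [] := by intro h; rw [h] at hlen; simp at hlen
      have hlt : l.length < n := by
        by_cases hm : xs.length = 0
        · have : counter * n + l.length = 0 := by rw [← hsum, hm]
          omega
        · have hmn : xs.length % n ≠ 0 := fun h => hc ⟨h, hm⟩
          have h2 : xs.length % n = l.length % n := by
            rw [hsum, mul_comm counter n, Nat.mul_add_mod]
          rcases lt_or_eq_of_le hle with h | h
          · exact h
          · exfalso; apply hmn; rw [h2, h, Nat.mod_self]
      have hmod : xs.length % n = l.length := by
        rw [hsum, mul_comm counter n, Nat.mul_add_mod, Nat.mod_eq_of_lt hlt]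
      have hdllen : arr.dropLast.length = counter := by
        simp [List.length_dropLast, hlen]
      have hdl : arr = arr.dropLast ++ [l] := by
        conv_lhs => rw [← List.dropLast_concat_getLast hne]
        congr 1
        rw [hl, List.getLast_eq_getElem hne, List.getD_eq_getElem arr [] (by omega)]
        simp [hlen]
      have hset : arr.set counter (l ++ [c]) = arr.dropLast ++ [l ++ [c]] := by
        conv_lhs => rw [hdl]
        rw [show counter = arr.dropLast.length from hdllen.symm, pvSetAppendLast]
      have hgdnew : (arr.dropLast ++ [l ++ [c]]).getD counter [] = l ++ [c] := by
        rw [show counter = arr.dropLast.length from hdllen.symm, pvGetDAppendLast]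
      refine ⟨arr.dropLast ++ [l ++ [c]], counter, by rw [hset], by simp [hdllen], ?_, ?_, ?_, ?_, ?_⟩
      · rw [hgdnew]
        simp only [List.length_append, List.length_append, List.length_cons, List.length_nil]
        omega
      · rw [hgdnew]; simp; omega
      · intro _; rw [hgdnew]; simp
      · intro a ha
        rcases List.mem_append.mp ha with h | h
        · exact hall a ((List.dropLast_sublist arr).subset h)
        · simp at h
          simp [h]
          omega
      · intro v hv
        have hA2 : colAt arr v = colAt arr.dropLast v ++ (l.drop v).take 1 := by
          conv_lhs => rw [hdl]
          exact colAt_append _ _ _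
        rw [colAt_append, colv_append, ← hcol v hv, hA2, hmod, List.append_assoc]
        congr 1
        exact pvDropTakeOne l c v

theorem colsStep_length (n : Nat) (cols : List (List Char)) (ic : Int × Char) :
    (colsStep n cols ic).length = cols.length := by
  simp [colsStep]

theorem colsStep_apply (n : Nat) (cols : List (List Char)) (i : Int) (c : Char) :
    colsStep n cols (i, c) = cols.set (i.toNat % n) (cols.getD (i.toNat % n) [] ++ [c]) := rfl

theorem colsFold_length (n : Nat) (text : List Char) :
    ((PySem.List.enumerate text).foldl (colsStep n) (List.replicate n ([] : List Char))).length = n := by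
  refine pvFoldlInv (P := fun l : List (List Char) => l.length = n) _ _ _ (by simp) ?_
  intro s x _ hs
  rw [colsStep_length, hs]

theorem colsFold_getD (n : Nat) (text : List Char) :
    ∀ v, v < n →
    ((PySem.List.enumerate text).foldl (colsStep n) (List.replicate n ([] : List Char))).getD v []
      = colv n v text := by
  induction text using List.reverseRecOn with
  | nil =>
    intro v hv
    rw [PySem.List.enumerate_nil, List.foldl_nil, colv_nil, List.getD_replicate _ hv]
  | append_singleton xs c ih =>
    intro v hv
    rw [PySem.List.enumerate_append, List.foldl_append]
    simp only [PySem.List.enumerate_cons, PySem.List.enumerate_nil, List.foldl_cons, List.foldl_nil]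
    rw [colsStep_apply]
    rw [show (((0 : Int) + (xs.length : Int)).toNat % n) = xs.length % n from by simp]
    rw [colv_append]
    have hlenF := colsFold_length n xs
    by_cases hc : xs.length % n = v
    · rw [hc, pvGetDSet_self _ _ _ (by omega), ih v hv, if_pos rfl]
    · rw [pvGetDSet_ne _ _ _ _ hc, ih v hv, if_neg hc, List.append_nil]

-- ---------- A's gather (resStep over arr)  =  B's gather (gatherStep over cols) ----------

theorem resStep_eq (value : Int) (hv : 0 ≤ value) (arr : List (List Char)) :
    ∀ res, arr.foldl (resInner value) res
      = res.set value.toNat (res.getD value.toNat [] ++ colAt arr value.toNat) := by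
  induction arr with
  | nil =>
    intro res
    rw [List.foldl_nil]
    simp only [colAt, List.flatMap_nil, List.append_nil]
    exact (pvSetGetDSelf res _).symm
  | cons a arr ih =>
    intro res
    rw [List.foldl_cons]
    by_cases hva : value < (a.length : Int)
    · have hnv : value.toNat < a.length := by omega
      have happ : resInner value res a
          = res.set value.toNat (res.getD value.toNat [] ++ [a[value.toNat]]) := by
        unfold resInner
        rw [if_pos hva, PySem.List.pyGet?_of_nonneg a hv, List.getElem?_eq_getElem hnv]
      rw [happ, ih]
      have hone : (a.drop value.toNat).take 1 = [a[value.toNat]] := by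
        rw [List.drop_eq_getElem_cons hnv]
        rfl
      have hcolcons : colAt (a :: arr) value.toNat = (a.drop value.toNat).take 1 ++ colAt arr value.toNat := by
        simp [colAt]
      by_cases hr : value.toNat < res.length
      · rw [pvGetDSet_self _ _ _ hr, List.set_set, hcolcons, hone, List.append_assoc]
      · have hsetno : ∀ x : List Char, res.set value.toNat x = res :=
          fun x => List.set_eq_of_length_le (by omega)
        simp only [hsetno]
    · have happ : resInner value res a = res := by
        unfold resInner
        rw [if_neg hva]
      rw [happ, ih]
      have hdrop : a.drop value.toNat = [] := List.drop_eq_nil_of_le (by omega)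
      have : colAt (a :: arr) value.toNat = colAt arr value.toNat := by
        simp [colAt, hdrop]
      rw [this]

theorem colAt_eq_nil (arr : List (List Char)) (v : Nat) (h : ∀ a ∈ arr, a.length ≤ v) :
    colAt arr v = [] := by
  unfold colAt
  rw [List.flatMap_eq_nil_iff]
  intro a ha
  rw [List.drop_eq_nil_of_le (h a ha)]
  rfl

theorem getD_out_of_range (l : List (List Char)) (v : Nat) (h : l.length ≤ v) :
    l.getD v [] = [] := by
  rw [List.getD_eq_getElem?_getD, List.getElem?_eq_none h]
  rfl

-- the heart of the rewrite: A's per-value rescan of arr equals B's read of the precomputed column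
theorem resStep_eq_gatherStep (n : Nat) (hn : 0 < n) (text : List Char)
    (arr : List (List Char)) (counter : Nat)
    (harr : (PySem.List.enumerate text).foldl (chunkStep n) ([[]], 0) = (arr, counter))
    (v : Int) (hv : 0 ≤ v) (res : List (List Char)) :
    resStep arr res v
      = gatherStep ((PySem.List.enumerate text).foldl (colsStep n) (List.replicate n ([] : List Char))) res v := by
  obtain ⟨arr', counter', harr', _, _, _, _, hall, hcol⟩ := chunkFold_inv n hn text
  rw [harr] at harr'
  have h1 : arr = arr' := congrArg Prod.fst harr'
  subst h1
  unfold resStep gatherStep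
  rw [resStep_eq v hv arr res]
  have hcols : colAt arr v.toNat
      = ((PySem.List.enumerate text).foldl (colsStep n) (List.replicate n ([] : List Char))).getD v.toNat [] := by
    by_cases hvn : v.toNat < n
    · rw [colsFold_getD n text v.toNat hvn, hcol v.toNat hvn]
    · rw [colAt_eq_nil arr v.toNat (fun a ha => le_trans (hall a ha) (by omega)),
          getD_out_of_range _ _ (by rw [colsFold_length]; omega)]
  rw [hcols]

-- ===== VERDICT (by name: the statement is the Claim_ definition above) =====
theorem encrypt_columnar_disrupted_spec : Claim_equal_encrypt_columnar_disrupted := by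
  intro plaintext key1 key2 _ hpre
  unfold Spec_encrypt_columnar_disrupted
  have hL : key1.toList ≠ [] := fun h => hpre.1 (String.toList_eq_nil_iff.mp h)
  have hn : 0 < key1.toList.length := List.length_pos_of_ne_nil hL
  unfold encrypt_columnar_disrupted encrypt_columnar_disrupted_alt
  simp only [makeSpaces_eq]
  set text := makeSpacesFast plaintext.toList key2.toList with htext
  set n := key1.toList.length with hnd
  set kv := pyGetOrder key1.toList with hkv
  obtain ⟨arr, counter, harr⟩ :
      ∃ a c, (PySem.List.enumerate text).foldl (chunkStep n) ([[]], 0) = (a, c) :=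
    ⟨_, _, rfl⟩
  rw [harr]
  have hres : kv.foldl (resStep arr) (List.replicate n ([] : List Char))
      = kv.foldl (gatherStep ((PySem.List.enumerate text).foldl (colsStep n) (List.replicate n ([] : List Char)))) (List.replicate n ([] : List Char)) := by
    apply PySem.List.foldl_congr_mem
    intro s v hvmem
    exact resStep_eq_gatherStep n hn text arr counter harr v (pyGetOrder_nonneg key1.toList v hvmem) s
  rw [hres]
  congr 1
  rw [PySem.List.foldl_append_eq_flatten]
  simp only [List.nil_append]
  rfl
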